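-- pv_equiv track=rewrite | github.com/BavlyZaher/Python-Assignments-Elzero | python-assignments-lesson-from-69-to-71.py | my_all
-- ===== SOURCE A (Python) =====
-- def my_all(things):
--   a = []
--   for thing in things:
--     if bool(thing) == True :
--       a.append(True)
--     else:
--       a.append(False)
--   if False in a :
--     return(False)
--   else:
--     return(True)
-- ===== SOURCE B (Python) =====
-- def my_all(things):
--   for thing in things:
--     if not thing:
--       return False
--   return True
-- ===== Notes on version B (the rewrite author's own statement) =====
-- stated objective: simpler
-- what changed: B is a single early-exiting pass returning False at the first falsy element, replacing A's build-a-boolean-list pass followed by a membership scan of that list.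
import Mathlib
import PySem

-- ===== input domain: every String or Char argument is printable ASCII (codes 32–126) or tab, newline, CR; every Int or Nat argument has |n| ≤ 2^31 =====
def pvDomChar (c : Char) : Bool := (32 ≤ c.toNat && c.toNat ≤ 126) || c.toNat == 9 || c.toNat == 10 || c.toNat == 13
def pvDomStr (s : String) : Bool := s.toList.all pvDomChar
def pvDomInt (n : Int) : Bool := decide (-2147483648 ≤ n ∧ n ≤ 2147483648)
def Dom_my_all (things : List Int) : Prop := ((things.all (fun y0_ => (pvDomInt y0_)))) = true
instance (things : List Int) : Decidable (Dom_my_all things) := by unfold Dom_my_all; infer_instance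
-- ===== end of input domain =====

-- ===== PORT A =====
-- A builds a list of bools then tests membership of false; port step for step.
def my_all (things : List Int) : Bool :=
  let a := things.foldl (fun acc thing =>
    if (thing != 0) == true then acc ++ [true] else acc ++ [false]) []
  if a.contains false then false else true

-- ===== PORT B =====
-- B: single early-exiting pass.
def my_all_alt : List Int → Bool
  | [] => true
  | thing :: rest => if thing == 0 then false else my_all_alt rest

-- ===== PRECONDITION & SPEC =====
def Spec_my_all (things : List Int) (out : Bool) : Prop := out = my_all_alt things
instance (things : List Int) (out : Bool) : Decidable (Spec_my_all things out) := by unfold Spec_my_all; infer_instance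

-- ===== CLAIM (what is proved, stated in full; the proofs are below) =====
def Claim_equal_my_all : Prop := ∀ (things : List Int), Dom_my_all things → Spec_my_all things (my_all things)

-- ===== LEMMAS AND PROOFS =====

lemma my_all_loop (things : List Int) (acc : List Bool) :
    (things.foldl (fun acc thing =>
      if (thing != 0) == true then acc ++ [true] else acc ++ [false]) acc).contains false
      = (acc.contains false || !(my_all_alt things)) := by
  induction things generalizing acc with
  | nil => simp [my_all_alt]
  | cons h t ih =>
    by_cases hz : h = 0
    · rw [List.foldl_cons]
      simp only [hz, bne_self_eq_false, Bool.false_eq_true, if_false]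
      rw [ih]
      simp [my_all_alt]
    · rw [List.foldl_cons]
      rw [if_pos (by simp [hz]), ih]
      simp [my_all_alt, hz]

-- ===== VERDICT (by name: the statement is the Claim_ definition above) =====
theorem my_all_spec : Claim_equal_my_all := by
  intro things _
  unfold Spec_my_all my_all
  simp only [my_all_loop]
  cases my_all_alt things <;> simp
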